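-- pv_equiv track=rewrite | github.com/sethbroberts/fundamentals_of_measurement | fom.py | calculate_intersection_and_remainders
-- ===== SOURCE A (Python) =====
-- def calculate_intersection_and_remainders(s1, s2):
--     "Given 2 set like objects, calculate their intersection and remainder in s1 and s2 that is not in intersection"
--     left_remainder = []
--     intersection = []
--     right_remainder = []
--     for e1 in s1:
--         if e1 in s2:
--             intersection.append(e1)
--         else:
--             left_remainder.append(e1)
--     for e2 in s2:
--         if e2 not in s1:
--             right_remainder.append(e2)
--     intersection.sort()
--     left_remainder.sort()
--     right_remainder.sort()
--     return left_remainder, intersection, right_remainder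
-- ===== SOURCE B (Python) =====
-- def calculate_intersection_and_remainders(s1, s2):
--     "Given 2 set like objects, calculate their intersection and remainder in s1 and s2 that is not in intersection"
--     a = sorted(s1)
--     b = sorted(s2)
--     left_remainder = []
--     intersection = []
--     right_remainder = []
--     i = j = 0
--     n, m = len(a), len(b)
--     while i < n and j < m:
--         if a[i] < b[j]:
--             left_remainder.append(a[i])
--             i += 1
--         elif b[j] < a[i]:
--             right_remainder.append(b[j])
--             j += 1
--         else:
--             v = a[i]
--             while i < n and a[i] == v:
--                 intersection.append(a[i])
--                 i += 1
--             while j < m and b[j] == v: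
--                 j += 1
--     left_remainder.extend(a[i:])
--     right_remainder.extend(b[j:])
--     return left_remainder, intersection, right_remainder
-- ===== Notes on version B (the rewrite author's own statement) =====
-- stated objective: faster
-- what changed: Replaces the two membership-scan passes plus three final sorts with sort-both-lists-first and a single two-pointer merge (with equal-run handling) that emits the three output lists already sorted.
import Mathlib
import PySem

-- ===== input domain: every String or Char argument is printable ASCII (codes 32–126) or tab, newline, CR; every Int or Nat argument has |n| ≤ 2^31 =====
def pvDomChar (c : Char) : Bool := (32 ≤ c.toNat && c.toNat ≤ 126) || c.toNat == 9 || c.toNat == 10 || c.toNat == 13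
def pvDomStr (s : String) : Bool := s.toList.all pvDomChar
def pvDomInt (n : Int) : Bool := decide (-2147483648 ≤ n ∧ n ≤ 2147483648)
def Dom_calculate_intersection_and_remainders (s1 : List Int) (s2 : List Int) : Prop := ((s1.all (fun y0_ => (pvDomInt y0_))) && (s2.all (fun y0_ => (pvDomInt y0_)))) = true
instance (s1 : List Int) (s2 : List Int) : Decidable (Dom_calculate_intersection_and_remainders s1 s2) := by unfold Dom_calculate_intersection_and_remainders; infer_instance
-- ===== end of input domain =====

-- B replaces A's two membership-scan passes and three final sorts by sorting both inputs
-- up front and running a single two-pointer merge that emits the three lists already sorted (faster).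

-- ===== PORT A =====
def calculate_intersection_and_remainders (s1 : List Int) (s2 : List Int) : List Int × List Int × List Int :=
  let left_remainder : List Int := []
  let intersection : List Int := []
  let right_remainder : List Int := []
  -- for e1 in s1: if e1 in s2: intersection.append(e1) else: left_remainder.append(e1)
  let li := s1.foldl
    (fun (p : List Int × List Int) e1 =>
      if s2.contains e1 then (p.1, p.2 ++ [e1]) else (p.1 ++ [e1], p.2))
    (left_remainder, intersection)
  let left_remainder := li.1
  let intersection := li.2
  -- for e2 in s2: if e2 not in s1: right_remainder.append(e2)
  let right_remainder := s2.foldl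
    (fun acc e2 => if !(s1.contains e2) then acc ++ [e2] else acc) right_remainder
  let intersection := PySem.List.sorted intersection (fun x => x) false
  let left_remainder := PySem.List.sorted left_remainder (fun x => x) false
  let right_remainder := PySem.List.sorted right_remainder (fun x => x) false
  (left_remainder, intersection, right_remainder)

-- ===== PORT B =====
-- the two-pointer merge loop of Source B as structural recursion on the two sorted lists
def pvMerge : List Int → List Int → List Int × List Int × List Int
  | [], b => ([], [], b)                     -- i = n: drain leftover b into right_remainder
  | x :: a, [] => (x :: a, [], [])           -- j = m: drain leftover a into left_remainder
  | x :: a, y :: b =>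
    if x < y then
      let r := pvMerge a (y :: b)
      (x :: r.1, r.2.1, r.2.2)
    else if y < x then
      let r := pvMerge (x :: a) b
      (r.1, r.2.1, y :: r.2.2)
    else
      -- equal: consume the run of x's in a into intersection, skip the run in b
      let run := (x :: a).takeWhile (fun t => t == x)
      let a' := (x :: a).dropWhile (fun t => t == x)
      let b' := (y :: b).dropWhile (fun t => t == x)
      let r := pvMerge a' b'
      (r.1, run ++ r.2.1, r.2.2)
termination_by a b => a.length + b.length
decreasing_by
  all_goals simp
  have h1 := List.length_dropWhile_le (fun t => t == x) a
  have h2 := List.length_dropWhile_le (fun t => t == x) (y :: b)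
  simp at h2
  omega

def calculate_intersection_and_remainders_alt (s1 : List Int) (s2 : List Int) : List Int × List Int × List Int :=
  pvMerge (PySem.List.sorted s1 (fun x => x) false) (PySem.List.sorted s2 (fun x => x) false)

-- ===== PRECONDITION & SPEC =====
def Spec_calculate_intersection_and_remainders (s1 : List Int) (s2 : List Int) (out : List Int × List Int × List Int) : Prop := out = calculate_intersection_and_remainders_alt s1 s2
instance (s1 : List Int) (s2 : List Int) (out : List Int × List Int × List Int) : Decidable (Spec_calculate_intersection_and_remainders s1 s2 out) := by unfold Spec_calculate_intersection_and_remainders; infer_instance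

-- ===== CLAIM (what is proved, stated in full; the proofs are below) =====
def Claim_equal_calculate_intersection_and_remainders : Prop := ∀ (s1 : List Int) (s2 : List Int), Dom_calculate_intersection_and_remainders s1 s2 → Spec_calculate_intersection_and_remainders s1 s2 (calculate_intersection_and_remainders s1 s2)

-- ===== LEMMAS AND PROOFS =====

-- A's first loop builds (prefix ++ elements not in s2, prefix ++ elements in s2)
theorem pvLoop1 (s2 : List Int) : ∀ (s1 : List Int) (L I : List Int),
    s1.foldl (fun (p : List Int × List Int) e1 =>
      if s2.contains e1 then (p.1, p.2 ++ [e1]) else (p.1 ++ [e1], p.2)) (L, I)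
    = (L ++ s1.filter (fun e => !(s2.contains e)), I ++ s1.filter (fun e => s2.contains e)) := by
  intro s1
  induction s1 with
  | nil => intro L I; simp
  | cons x t ih =>
    intro L I
    by_cases h : s2.contains x = true
    · simp only [List.foldl_cons, List.filter_cons, h]
      rw [ih]
      simp
    · have h' : s2.contains x = false := by simpa using h
      simp only [List.foldl_cons, List.filter_cons, h']
      rw [ih]
      simp

theorem pvGtDrop (x : Int) : ∀ (l : List Int), l.Pairwise (· ≤ ·) → (∀ e ∈ l, x ≤ e) →
    ∀ e ∈ l.dropWhile (fun t => t == x), x < e := by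
  intro l
  induction l with
  | nil => simp
  | cons h t ih =>
    intro hp hge
    rw [List.pairwise_cons] at hp
    rw [List.dropWhile_cons]
    by_cases hx : (h == x) = true
    · rw [if_pos hx]
      exact ih hp.2 (fun e he => hge e (List.mem_cons_of_mem _ he))
    · rw [if_neg hx]
      intro e he
      rcases List.mem_cons.mp he with rfl | he
      · have := hge e List.mem_cons_self
        simp at hx
        omega
      · have hxh : x < h := by
          have := hge h List.mem_cons_self; simp at hx; omega
      
        exact lt_of_lt_of_le hxh (hp.1 e he)

theorem pvMerge_eq : ∀ (a b : List Int), a.Pairwise (· ≤ ·) → b.Pairwise (· ≤ ·) →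
    pvMerge a b = (a.filter (fun e => !(b.contains e)),
                   a.filter (fun e => b.contains e),
                   b.filter (fun e => !(a.contains e))) := by
  intro a b
  induction a, b using pvMerge.induct with
  | case1 b => intro _ _; simp [pvMerge]
  | case2 x a => intro _ _; simp [pvMerge]
  | case3 x a y b hxy ih =>
    intro ha hb
    rw [List.pairwise_cons] at ha
    have hyb := (List.pairwise_cons.mp hb).1
    have hnx : (y :: b).contains x = false := by
      simp only [List.contains_eq_mem, decide_eq_false_iff_not]
      intro hm
      rcases List.mem_cons.mp hm with rfl | hm
      · omega
      · have := hyb x hm; omega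
    simp only [pvMerge, if_pos hxy]
    rw [ih ha.2 hb]
    refine Prod.ext ?_ (Prod.ext ?_ ?_) <;> simp only
    · rw [List.filter_cons, hnx]; simp
    · rw [List.filter_cons, hnx]; simp
    · refine List.filter_congr ?_
      intro e he
      have hex : e ≠ x := by
        rcases List.mem_cons.mp he with rfl | hm
        · omega
        · have := hyb e hm; omega
      simp [hex]
  | case4 x a y b hxy hyx ih =>
    intro ha hb
    rw [List.pairwise_cons] at hb
    have hxa := (List.pairwise_cons.mp ha).1
    have hny : (x :: a).contains y = false := by
      simp only [List.contains_eq_mem, decide_eq_false_iff_not]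
      intro hm
      rcases List.mem_cons.mp hm with rfl | hm
      · omega
      · have := hxa y hm; omega
    simp only [pvMerge, if_neg hxy, if_pos hyx]
    rw [ih ha hb.2]
    refine Prod.ext ?_ (Prod.ext ?_ ?_) <;> simp only
    · refine List.filter_congr ?_
      intro e he
      have hey : e ≠ y := by
        rcases List.mem_cons.mp he with rfl | hm
        · omega
        · have := hxa e hm; omega
      simp [hey]
    · refine List.filter_congr ?_
      intro e he
      have hey : e ≠ y := by
        rcases List.mem_cons.mp he with rfl | hm
        · omega
        · have := hxa e hm; omega
      simp [hey]
    · simp at hny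
      rw [List.filter_cons]
      simp [hny]
  | case5 x a y b hxy hyx a' b' ih =>
    intro ha hb
    have heq : y = x := by omega
    have hsa : a'.Pairwise (· ≤ ·) := ha.sublist (List.dropWhile_sublist _)
    have hsb : b'.Pairwise (· ≤ ·) := hb.sublist (List.dropWhile_sublist _)
    have hga : ∀ e ∈ a', x < e := pvGtDrop x (x :: a) ha (by
      intro e he; rcases List.mem_cons.mp he with rfl | hm
      · omega
      · exact (List.pairwise_cons.mp ha).1 e hm)
    have hgb : ∀ e ∈ b', x < e := pvGtDrop x (y :: b) hb (by
      intro e he; rcases List.mem_cons.mp he with rfl | hm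
      · omega
      · have := (List.pairwise_cons.mp hb).1 e hm; omega)
    have hda := (List.takeWhile_append_dropWhile (p := fun t => t == x) (l := x :: a)).symm
    have hdb := (List.takeWhile_append_dropWhile (p := fun t => t == x) (l := y :: b)).symm
    have hruna : ∀ e ∈ (x :: a).takeWhile (fun t => t == x), e = x :=
      fun e he => by simpa using List.mem_takeWhile_imp he
    have hrunb : ∀ e ∈ (y :: b).takeWhile (fun t => t == x), e = x :=
      fun e he => by simpa using List.mem_takeWhile_imp he
    have hcy : x ∈ y :: b := by rw [heq]; exact List.mem_cons_self
    have hcx : x ∈ x :: a := List.mem_cons_self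
    have hmemb : ∀ e, e ≠ x → ((e ∈ y :: b) ↔ e ∈ b') := by
      intro e hex
      constructor
      · intro hm
        rw [hdb] at hm
        rcases List.mem_append.mp hm with h | h
        · exact absurd (hrunb e h) hex
        · exact h
      · intro hm
        exact (List.dropWhile_sublist _).subset hm
    have hmema : ∀ e, e ≠ x → ((e ∈ x :: a) ↔ e ∈ a') := by
      intro e hex
      constructor
      · intro hm
        rw [hda] at hm
        rcases List.mem_append.mp hm with h | h
        · exact absurd (hruna e h) hex
        · exact h
      · intro hm
        exact (List.dropWhile_sublist _).subset hm
    simp only [pvMerge, if_neg hxy, if_neg hyx]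
    rw [ih hsa hsb]
    refine Prod.ext ?_ (Prod.ext ?_ ?_) <;> simp only
    · conv_rhs => rw [hda]
      rw [List.filter_append]
      have h1 : (List.takeWhile (fun t => t == x) (x :: a)).filter
          (fun e => !(y :: b).contains e) = [] := by
        rw [List.filter_eq_nil_iff]
        intro e he
        rw [hruna e he]
        simp [hcy]
      rw [h1, List.nil_append]
      refine (List.filter_congr ?_).symm
      intro e he
      have hex : e ≠ x := by have := hga e he; omega
      simp [List.contains_eq_mem, hmemb e hex]
    · conv_rhs => rw [hda]
      rw [List.filter_append]
      have h1 : (List.takeWhile (fun t => t == x) (x :: a)).filter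
          (fun e => (y :: b).contains e) = List.takeWhile (fun t => t == x) (x :: a) := by
        rw [List.filter_eq_self]
        intro e he
        rw [hruna e he]
        simp [hcy]
      rw [h1]
      congr 1
      refine (List.filter_congr ?_).symm
      intro e he
      have hex : e ≠ x := by have := hga e he; omega
      simp [List.contains_eq_mem, hmemb e hex]
    · conv_rhs => rw [hdb]
      rw [List.filter_append]
      have h1 : (List.takeWhile (fun t => t == x) (y :: b)).filter
          (fun e => !(x :: a).contains e) = [] := by
        rw [List.filter_eq_nil_iff]
        intro e he
        rw [hrunb e he]
        simp [hcx]
      rw [h1, List.nil_append]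
      refine (List.filter_congr ?_).symm
      intro e he
      have hex : e ≠ x := by have := hgb e he; omega
      simp [List.contains_eq_mem, hmema e hex]

theorem pvContains_sorted (l : List Int) (e : Int) :
    (PySem.List.sorted l (fun x => x) false).contains e = l.contains e := by
  simp [List.contains_eq_mem, PySem.List.mem_sorted]

theorem pvSorted_filter (p : Int → Bool) (l : List Int) :
    PySem.List.sorted (l.filter p) (fun x => x) false
      = (PySem.List.sorted l (fun x => x) false).filter p := by
  refine PySem.List.sorted_id_eq_of_perm_of_pairwise _ _ ?_ ?_
  · exact (PySem.List.sorted_perm l (fun x => x) false).filter p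
  · exact (PySem.List.sorted_pairwise l (fun x => x)).filter p

-- ===== VERDICT (by name: the statement is the Claim_ definition above) =====
theorem calculate_intersection_and_remainders_spec : Claim_equal_calculate_intersection_and_remainders := by
  intro s1 s2 _
  unfold Spec_calculate_intersection_and_remainders
  unfold calculate_intersection_and_remainders calculate_intersection_and_remainders_alt
  rw [pvMerge_eq _ _ (PySem.List.sorted_pairwise s1 (fun x => x)) (PySem.List.sorted_pairwise s2 (fun x => x))]
  simp only [pvLoop1, List.nil_append, PySem.List.foldl_append_if_eq_filter]
  refine Prod.ext ?_ (Prod.ext ?_ ?_) <;> simp only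
  · rw [pvSorted_filter]
    exact List.filter_congr (fun e _ => by rw [pvContains_sorted])
  · rw [pvSorted_filter]
    exact List.filter_congr (fun e _ => by rw [pvContains_sorted])
  · rw [pvSorted_filter]
    exact List.filter_congr (fun e _ => by rw [pvContains_sorted])
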